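-- pv_equiv track=rewrite | github.com/gabrielceh/pokemon_data_python | graphics/bars_pokemon.py | _get_types_totals
-- ===== SOURCE A (Python) =====
-- _types_count = {
-- 		"bug":0,
-- 		"dark":0,
-- 		"dragon":0,
-- 		"electric":0,
-- 		"fairy":0,
-- 		"fighting":0,
-- 		"fire":0,
-- 		"flying":0,
-- 		"ghost":0,
-- 		"grass":0,
-- 		"ground":0,
-- 		"ice":0,
-- 		"normal":0,
-- 		"poison":0,
-- 		"psychic":0,
-- 		"rock":0,
-- 		"steel":0,
-- 		"water":0,
-- 		"none":0
-- 	}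
--
-- def _get_types_totals(list_pokemon, is_secondary = False):
-- 	type_data = "PrimaryType" if not is_secondary else "SecondaryType"
-- 	types = list(map(lambda x: x[type_data], list_pokemon))
-- 	types_count = _types_count.copy()
-- 	for t in types:
-- 		if t == "":
-- 			types_count["none"] += 1
-- 		elif t in types_count:
-- 			types_count[t] += 1
-- 	return types_count
-- ===== SOURCE B (Python) =====
-- _TYPE_KEYS = ("bug", "dark", "dragon", "electric", "fairy", "fighting", "fire",
--               "flying", "ghost", "grass", "ground", "ice", "normal", "poison",
--               "psychic", "rock", "steel", "water")
--
-- def _get_types_totals(list_pokemon, is_secondary=False):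
-- 	key = "SecondaryType" if is_secondary else "PrimaryType"
-- 	types = [p[key] for p in list_pokemon]
-- 	totals = {t: types.count(t) for t in _TYPE_KEYS}
-- 	totals["none"] = types.count("none") + types.count("")
-- 	return totals
-- ===== Notes on version B (the rewrite author's own statement) =====
-- stated objective: simpler
-- what changed: Instead of A's per-pokemon if/elif loop mutating a running counter dict, B extracts all type strings once and builds the result by one list.count per fixed key, folding '' into 'none' with a final sum.
-- outside the precondition, e.g. on _get_types_totals([{'PrimaryType': 'fire'}], True): A raises KeyError, B raises KeyError
import Mathlib
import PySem

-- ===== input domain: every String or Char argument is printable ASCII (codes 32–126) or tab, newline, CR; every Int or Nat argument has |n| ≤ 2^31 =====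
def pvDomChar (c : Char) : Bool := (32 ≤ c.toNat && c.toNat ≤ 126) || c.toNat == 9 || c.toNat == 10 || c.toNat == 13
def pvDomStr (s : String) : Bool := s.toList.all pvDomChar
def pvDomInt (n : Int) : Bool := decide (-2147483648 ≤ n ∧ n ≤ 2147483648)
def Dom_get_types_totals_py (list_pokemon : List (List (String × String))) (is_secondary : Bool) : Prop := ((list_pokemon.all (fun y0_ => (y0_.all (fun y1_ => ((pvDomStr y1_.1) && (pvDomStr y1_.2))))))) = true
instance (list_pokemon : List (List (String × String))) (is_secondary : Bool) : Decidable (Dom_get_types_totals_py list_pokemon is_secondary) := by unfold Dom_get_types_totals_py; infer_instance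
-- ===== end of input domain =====

-- B replaces A's per-pokemon if/elif increment loop by extracting all type strings and
-- taking one `.count` per fixed key (folding "" into "none"); objective: simpler.

-- ===== PORT A =====

-- the module constant _types_count (a dict literal; keys distinct)
def pvTemplate : PySem.Dict String Int := PySem.Dict.mk
  [("bug",0),("dark",0),("dragon",0),("electric",0),("fairy",0),("fighting",0),("fire",0),
   ("flying",0),("ghost",0),("grass",0),("ground",0),("ice",0),("normal",0),("poison",0),
   ("psychic",0),("rock",0),("steel",0),("water",0),("none",0)]

def get_types_totals_py (list_pokemon : List (List (String × String))) (is_secondary : Bool) : List (String × Int) :=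
  let type_data := if !is_secondary then "PrimaryType" else "SecondaryType"
  -- x[type_data]: KeyError when absent; Pre_ excludes that, so the default "" is never used
  let types := list_pokemon.map (fun x => (PySem.Dict.mk x).getD type_data "")
  let types_count := types.foldl (fun d t =>
      if t == "" then d.modify "none" 0 (· + 1)
      else if d.contains t then d.modify t 0 (· + 1)
      else d) pvTemplate
  types_count.items

-- ===== PORT B =====

-- _TYPE_KEYS
def pvTypeKeys : List String :=
  ["bug","dark","dragon","electric","fairy","fighting","fire","flying","ghost","grass",
   "ground","ice","normal","poison","psychic","rock","steel","water"]

def get_types_totals_py_alt (list_pokemon : List (List (String × String))) (is_secondary : Bool) : List (String × Int) :=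
  let key := if is_secondary then "SecondaryType" else "PrimaryType"
  let types := list_pokemon.map (fun p => (PySem.Dict.mk p).getD key "")
  -- dict comprehension over the 18 distinct literal keys, then totals["none"] = … appends the fresh key
  pvTypeKeys.map (fun t => (t, (types.count t : Int)))
    ++ [("none", (types.count "none" : Int) + (types.count "" : Int))]

-- ===== PRECONDITION & SPEC =====

-- Pre_ excludes pokemon records missing the selected type key, on which both Pythons raise KeyError.
def Pre_get_types_totals_py (list_pokemon : List (List (String × String))) (is_secondary : Bool) : Prop :=
  (list_pokemon.all (fun x =>
    x.any (fun p => p.1 == (if is_secondary then "SecondaryType" else "PrimaryType")))) = true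

instance (list_pokemon : List (List (String × String))) (is_secondary : Bool) : Decidable (Pre_get_types_totals_py list_pokemon is_secondary) := by unfold Pre_get_types_totals_py; infer_instance

def pvWitness_get_types_totals_py : (List (List (String × String))) × Bool :=
  ([[("PrimaryType","fire"),("SecondaryType","")],[("PrimaryType","fire"),("SecondaryType","flying")]], false)

def Spec_get_types_totals_py (list_pokemon : List (List (String × String))) (is_secondary : Bool) (out : List (String × Int)) : Prop := out = get_types_totals_py_alt list_pokemon is_secondary

instance (list_pokemon : List (List (String × String))) (is_secondary : Bool) (out : List (String × Int)) : Decidable (Spec_get_types_totals_py list_pokemon is_secondary out) := by unfold Spec_get_types_totals_py; infer_instance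

-- ===== CLAIM =====

def Claim_equal_get_types_totals_py : Prop := ∀ (list_pokemon : List (List (String × String))) (is_secondary : Bool), Dom_get_types_totals_py list_pokemon is_secondary → Pre_get_types_totals_py list_pokemon is_secondary → Spec_get_types_totals_py list_pokemon is_secondary (get_types_totals_py list_pokemon is_secondary)

-- ===== LEMMAS AND PROOFS =====

def pvKEYS : List String := pvTypeKeys ++ ["none"]

def pvStep (d : PySem.Dict String Int) (t : String) : PySem.Dict String Int :=
  if t == "" then d.modify "none" 0 (· + 1)
  else if d.contains t then d.modify t 0 (· + 1)
  else d

lemma pvKeys_step (d : PySem.Dict String Int) (t : String) (hk : d.keys = pvKEYS) :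
    (pvStep d t).keys = pvKEYS := by
  unfold pvStep
  split_ifs with h1 h2
  · rw [PySem.Dict.keys_modify,
        PySem.Dict.keys_insert_of_contains _ _
          ((PySem.Dict.contains_iff_mem_keys _ _).mpr (by rw [hk]; decide)), hk]
  · rw [PySem.Dict.keys_modify, PySem.Dict.keys_insert_of_contains _ _ h2, hk]
  · exact hk

lemma pvKeys_foldl (l : List String) (d : PySem.Dict String Int) (hk : d.keys = pvKEYS) :
    (l.foldl pvStep d).keys = pvKEYS := by
  induction l generalizing d with
  | nil => exact hk
  | cons t l ih => rw [List.foldl_cons]; exact ih _ (pvKeys_step d t hk)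

def pvNorm (t : String) : String := if t = "" then "none" else t

lemma pvStep_getD (d : PySem.Dict String Int) (t k : String)
    (hk : d.keys = pvKEYS) (hkm : k ∈ pvKEYS) :
    (pvStep d t).getD k 0 = d.getD k 0 + (if pvNorm t == k then 1 else 0) := by
  unfold pvStep pvNorm
  by_cases h0 : t = ""
  · rw [if_pos (beq_iff_eq.mpr h0), if_pos h0, PySem.Dict.getD_modify]
    by_cases hk1 : k = "none"
    · rw [if_pos hk1, if_pos (beq_iff_eq.mpr hk1.symm), hk1]
    · rw [if_neg hk1, if_neg (fun hc => hk1 (beq_iff_eq.mp hc).symm), add_zero]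
  · rw [if_neg (fun hc => h0 (beq_iff_eq.mp hc)), if_neg h0]
    by_cases hc : d.contains t = true
    · rw [if_pos hc, PySem.Dict.getD_modify]
      by_cases hk1 : k = t
      · rw [if_pos hk1, if_pos (beq_iff_eq.mpr hk1.symm), hk1]
      · rw [if_neg hk1, if_neg (fun hb => hk1 (beq_iff_eq.mp hb).symm), add_zero]
    · rw [if_neg hc]
      have htk : t ∉ pvKEYS := fun hm =>
        hc ((PySem.Dict.contains_iff_mem_keys d t).mpr (hk ▸ hm))
      have hne : ¬ (t = k) := fun h => htk (h ▸ hkm)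
      rw [if_neg (fun hb => hne (beq_iff_eq.mp hb)), add_zero]

lemma pvGetD_foldl (l : List String) (d : PySem.Dict String Int)
    (hk : d.keys = pvKEYS) (k : String) (hkm : k ∈ pvKEYS) :
    (l.foldl pvStep d).getD k 0 = d.getD k 0 + (l.countP (fun t => pvNorm t == k) : Int) := by
  induction l generalizing d with
  | nil => rw [List.foldl_nil, List.countP_nil]; norm_num
  | cons t l ih =>
    rw [List.foldl_cons, List.countP_cons,
        ih _ (pvKeys_step d t hk), pvStep_getD d t k hk hkm]
    push_cast
    ring

lemma pvAux (k : String) : ∀ l : List (String × Int),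
    (∀ p ∈ l, p.2 = 0) → ((PySem.Dict.mk l).get? k).getD 0 = 0 := by
  intro l
  induction l with
  | nil => intro _; rfl
  | cons a l ih =>
    intro h
    rw [PySem.Dict.get?_mk_cons]
    split
    · exact h a (by simp)
    · exact ih (fun p hp => h p (List.mem_cons_of_mem a hp))

lemma pvTemplate_getD (k : String) : pvTemplate.getD k 0 = 0 := by
  rw [PySem.Dict.getD_eq_get?_getD]
  exact pvAux k _ (by decide)

lemma pvCountP_none (l : List String) :
    l.countP (fun t => pvNorm t == "none") = l.count "none" + l.count "" := by
  induction l with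
  | nil => rfl
  | cons t l ih =>
    rw [List.countP_cons, List.count_cons, List.count_cons, ih]
    by_cases h : t = ""
    · simp [pvNorm, h]; omega
    · by_cases h2 : t = "none" <;> simp [pvNorm, h, h2] <;> omega

lemma pvCountP_key (l : List String) (k : String) (hne : k ≠ "") (hnn : k ≠ "none") :
    l.countP (fun t => pvNorm t == k) = l.count k := by
  rw [List.count_eq_countP]
  apply List.countP_congr
  intro t _
  unfold pvNorm
  constructor
  · intro hb
    by_cases h : t = ""
    · exact absurd (beq_iff_eq.mp (by rwa [if_pos h] at hb)).symm hnn
    · rwa [if_neg h] at hb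
  · intro hb
    have ht : t = k := by simpa [eq_comm] using beq_iff_eq.mp hb
    rw [if_neg (ht ▸ hne ∘ Eq.symm ∘ fun h => h ▸ rfl)]
    · exact hb

lemma pvMain (types : List String) :
    (types.foldl pvStep pvTemplate).items =
      pvTypeKeys.map (fun t => (t, (types.count t : Int)))
        ++ [("none", (types.count "none" : Int) + (types.count "" : Int))] := by
  have hkeys : pvTemplate.keys = pvKEYS := rfl
  have hnodup : (types.foldl pvStep pvTemplate).keys.Nodup := by
    rw [pvKeys_foldl types pvTemplate hkeys]; decide
  rw [PySem.Dict.items_eq_map_keys (types.foldl pvStep pvTemplate) hnodup 0,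
      pvKeys_foldl types pvTemplate hkeys]
  show (pvTypeKeys ++ ["none"]).map _ = _
  rw [List.map_append]
  congr 1
  · apply List.map_congr_left
    intro k hkm
    have h := List.all_eq_true.mp
      (show pvTypeKeys.all (fun s => !(s == "") && !(s == "none")) = true by decide) k hkm
    simp only [Bool.and_eq_true, Bool.not_eq_true', beq_eq_false_iff_ne] at h
    rw [pvGetD_foldl types pvTemplate hkeys k (List.mem_append_left _ hkm),
        pvTemplate_getD, pvCountP_key types k h.1 h.2, zero_add]
  · rw [List.map_singleton,
        pvGetD_foldl types pvTemplate hkeys "none" (by decide : "none" ∈ pvKEYS),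
        pvTemplate_getD, pvCountP_none, zero_add]
    push_cast
    ring_nf

-- ===== VERDICT =====

theorem get_types_totals_py_spec : Claim_equal_get_types_totals_py := by
  intro lp sec _ _
  cases sec <;> exact pvMain _
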